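-- pv_equiv track=rewrite | github.com/dazhaolang/vibereserch | app/services/smart_research_assistant.py | _limit_segments_by_literature
-- ===== SOURCE A (Python) =====
-- from typing import List, Dict, Optional, Any, Tuple
-- from collections import defaultdict
--
-- def _limit_segments_by_literature(
--
--     segments: List[Dict[str, Any]],
--     max_literature_count: int,
--     max_segments_per_literature: int = 3,
-- ) -> List[Dict[str, Any]]:
--     """限制段落数量，确保涉及的文献数量符合设定"""
--     filtered: List[Dict[str, Any]] = []
--     literature_seen: Dict[int, int] = defaultdict(int)
--
--     for segment in segments:
--         literature_id = segment.get("literature_id")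
--         if literature_id is None:
--             continue
--
--         current_unique = len(literature_seen)
--         if literature_id not in literature_seen and current_unique >= max_literature_count:
--             continue
--
--         if literature_seen[literature_id] >= max_segments_per_literature:
--             continue
--
--         filtered.append(segment)
--         literature_seen[literature_id] += 1
--
--     return filtered
-- ===== SOURCE B (Python) =====
-- from typing import List, Dict, Any
--
-- def _limit_segments_by_literature(
--     segments: List[Dict[str, Any]],
--     max_literature_count: int,
--     max_segments_per_literature: int = 3,
-- ) -> List[Dict[str, Any]]:
--     # Pass 1: the first max_literature_count distinct literature ids, in appearance order.
--     allowed: List[Any] = []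
--     for segment in segments:
--         if len(allowed) >= max_literature_count:
--             break
--         lid = segment.get("literature_id")
--         if lid is not None and lid not in allowed:
--             allowed.append(lid)
--     # Pass 2: keep segments of allowed literatures, up to the per-literature cap.
--     counts = {lid: 0 for lid in allowed}
--     result: List[Dict[str, Any]] = []
--     for segment in segments:
--         lid = segment.get("literature_id")
--         if lid in counts and counts[lid] < max_segments_per_literature:
--             result.append(segment)
--             counts[lid] += 1
--     return result
-- ===== Notes on version B (the rewrite author's own statement) =====
-- stated objective: alternative
-- what changed: A's single loop over a mutating defaultdict (which both admits literatures and counts kept segments) is replaced by two independent passes: first collect the first max_literature_count distinct literature ids in appearance order, then keep segments of those ids up to the per-literature cap.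
import Mathlib
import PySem

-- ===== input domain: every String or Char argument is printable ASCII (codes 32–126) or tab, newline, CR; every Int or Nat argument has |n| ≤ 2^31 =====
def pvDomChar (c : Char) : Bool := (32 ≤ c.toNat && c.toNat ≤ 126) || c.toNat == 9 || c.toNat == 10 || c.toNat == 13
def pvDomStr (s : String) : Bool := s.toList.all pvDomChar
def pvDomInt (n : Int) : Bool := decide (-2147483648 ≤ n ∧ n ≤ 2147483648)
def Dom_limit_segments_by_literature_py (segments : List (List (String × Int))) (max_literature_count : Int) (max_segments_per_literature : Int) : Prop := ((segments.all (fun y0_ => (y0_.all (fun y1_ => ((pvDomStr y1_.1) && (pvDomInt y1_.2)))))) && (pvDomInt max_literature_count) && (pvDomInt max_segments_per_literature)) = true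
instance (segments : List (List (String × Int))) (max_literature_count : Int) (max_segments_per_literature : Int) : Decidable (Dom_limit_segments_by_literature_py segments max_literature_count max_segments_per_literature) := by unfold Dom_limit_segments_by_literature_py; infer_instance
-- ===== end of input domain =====

-- B replaces A's single stateful loop (a defaultdict that both counts and admits literatures)
-- by two passes: first collect the allowed literature ids, then keep capped segments; objective: simpler decomposition, same cost.

-- segment.get("literature_id"): first-match lookup in the segment's association list
def pvLidGet (seg : List (String × Int)) : Option Int :=
  (PySem.Dict.mk seg).get? "literature_id"

-- ===== PORT A =====
-- the loop of A: state = (filtered so far, literature_seen : defaultdict(int))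
def pvGoA (maxL cap : Int) (segs : List (List (String × Int)))
    (filtered : List (List (String × Int))) (seen : PySem.Dict Int Int) :
    List (List (String × Int)) :=
  match segs with
  | [] => filtered
  | seg :: rest =>
    match pvLidGet seg with
    | none => pvGoA maxL cap rest filtered seen
    | some lid =>
      if !seen.contains lid && decide ((seen.size : Int) ≥ maxL) then
        pvGoA maxL cap rest filtered seen
      else
        -- defaultdict read literature_seen[lid] creates the key with value 0 when absent
        let v := seen.getD lid 0
        let seen' := if seen.contains lid then seen else seen.insert lid 0
        if decide (v ≥ cap) then
          pvGoA maxL cap rest filtered seen'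
        else
          pvGoA maxL cap rest (filtered ++ [seg]) (seen'.insert lid (v + 1))

def limit_segments_by_literature_py (segments : List (List (String × Int))) (max_literature_count : Int) (max_segments_per_literature : Int) : List (List (String × Int)) :=
  pvGoA max_literature_count max_segments_per_literature segments [] PySem.Dict.empty

-- ===== PORT B =====
-- pass 1 of B: the first max_literature_count distinct literature ids, in appearance order
def pvAllowed (maxL : Int) (segs : List (List (String × Int))) (acc : List Int) : List Int :=
  match segs with
  | [] => acc
  | seg :: rest =>
    if decide ((acc.length : Int) ≥ maxL) then acc
    else
      match pvLidGet seg with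
      | none => pvAllowed maxL rest acc
      | some lid =>
        if lid ∈ acc then pvAllowed maxL rest acc else pvAllowed maxL rest (acc ++ [lid])

-- pass 2 of B: keep while the per-literature counter is below the cap
def pvKeep (cap : Int) (segs : List (List (String × Int))) (counts : PySem.Dict Int Int) :
    List (List (String × Int)) :=
  match segs with
  | [] => []
  | seg :: rest =>
    match pvLidGet seg with
    | none => pvKeep cap rest counts
    | some lid =>
      match counts.get? lid with
      | none => pvKeep cap rest counts
      | some c =>
        if decide (c < cap) then seg :: pvKeep cap rest (counts.insert lid (c + 1))
        else pvKeep cap rest counts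

def limit_segments_by_literature_py_alt (segments : List (List (String × Int))) (max_literature_count : Int) (max_segments_per_literature : Int) : List (List (String × Int)) :=
  let allowed := pvAllowed max_literature_count segments []
  let counts := allowed.foldl (fun d lid => d.insert lid 0) PySem.Dict.empty
  pvKeep max_segments_per_literature segments counts

-- ===== PRECONDITION & SPEC =====
def Spec_limit_segments_by_literature_py (segments : List (List (String × Int))) (max_literature_count : Int) (max_segments_per_literature : Int) (out : List (List (String × Int))) : Prop := out = limit_segments_by_literature_py_alt segments max_literature_count max_segments_per_literature
instance (segments : List (List (String × Int))) (max_literature_count : Int) (max_segments_per_literature : Int) (out : List (List (String × Int))) : Decidable (Spec_limit_segments_by_literature_py segments max_literature_count max_segments_per_literature out) := by unfold Spec_limit_segments_by_literature_py; infer_instance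

-- ===== CLAIM (what is proved, stated in full; the proofs are below) =====
def Claim_equal_limit_segments_by_literature_py : Prop := ∀ (segments : List (List (String × Int))) (max_literature_count : Int) (max_segments_per_literature : Int), Dom_limit_segments_by_literature_py segments max_literature_count max_segments_per_literature → Spec_limit_segments_by_literature_py segments max_literature_count max_segments_per_literature (limit_segments_by_literature_py segments max_literature_count max_segments_per_literature)

-- ===== LEMMAS AND PROOFS =====

-- once the accumulator is full, pass 1 never extends it
theorem pvAllowed_full (maxL : Int) (segs : List (List (String × Int))) (acc : List Int)
    (h : (acc.length : Int) ≥ maxL) : pvAllowed maxL segs acc = acc := by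
  cases segs with
  | nil => rfl
  | cons seg rest => simp [pvAllowed, h]

-- pass 1 only extends the accumulator
theorem mem_pvAllowed (maxL : Int) (segs : List (List (String × Int))) (acc : List Int)
    (x : Int) (hx : x ∈ acc) : x ∈ pvAllowed maxL segs acc := by
  induction segs generalizing acc with
  | nil => exact hx
  | cons seg rest ih =>
    by_cases hf : (acc.length : Int) ≥ maxL
    · simpa [pvAllowed, hf] using hx
    · cases hg : pvLidGet seg with
      | none => simpa [pvAllowed, hf, hg] using ih acc hx
      | some lid =>
        by_cases hm : lid ∈ acc
        · simpa [pvAllowed, hf, hg, hm] using ih acc hx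
        · simpa [pvAllowed, hf, hg, hm] using ih (acc ++ [lid]) (by simp [hx])

-- appending a fresh element keeps a list duplicate-free
theorem pvNodupSnoc {l : List Int} {x : Int} (h : l.Nodup) (hx : x ∉ l) : (l ++ [x]).Nodup := by
  rw [List.nodup_append]
  refine ⟨h, List.nodup_singleton x, ?_⟩
  intro a ha b hb
  simp only [List.mem_singleton] at hb
  subst hb
  exact fun e => hx (e ▸ ha)

-- pass 1 keeps the accumulator duplicate-free
theorem pvAllowed_nodup (maxL : Int) (segs : List (List (String × Int))) (acc : List Int)
    (h : acc.Nodup) : (pvAllowed maxL segs acc).Nodup := by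
  induction segs generalizing acc with
  | nil => exact h
  | cons seg rest ih =>
    by_cases hf : (acc.length : Int) ≥ maxL
    · simpa [pvAllowed, hf] using h
    · cases hg : pvLidGet seg with
      | none => simpa [pvAllowed, hf, hg] using ih acc h
      | some lid =>
        by_cases hm : lid ∈ acc
        · simpa [pvAllowed, hf, hg, hm] using ih acc h
        · simpa [pvAllowed, hf, hg, hm] using ih (acc ++ [lid]) (pvNodupSnoc h hm)

-- the invariant tying A's evolving defaultdict to B's counts dictionary
def pvRel (maxL : Int) (segs : List (List (String × Int)))
    (seen counts : PySem.Dict Int Int) : Prop :=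
  counts.keys = pvAllowed maxL segs seen.keys ∧
  seen.keys.Nodup ∧
  (∀ k, k ∈ seen.keys → counts.get? k = seen.get? k) ∧
  (∀ k, k ∈ counts.keys → k ∉ seen.keys → counts.get? k = some 0)

theorem pvMain (maxL cap : Int) (segs : List (List (String × Int)))
    (filtered : List (List (String × Int))) (seen counts : PySem.Dict Int Int)
    (hrel : pvRel maxL segs seen counts) :
    pvGoA maxL cap segs filtered seen = filtered ++ pvKeep cap segs counts := by
  induction segs generalizing filtered seen counts with
  | nil => simp [pvGoA, pvKeep]
  | cons seg rest ih =>
    obtain ⟨hkeys, hnd, hval, hnew⟩ := hrel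
    cases hg : pvLidGet seg with
    | none =>
      have hstep : pvAllowed maxL (seg :: rest) seen.keys = pvAllowed maxL rest seen.keys := by
        by_cases hf : ((seen.keys.length : Int) ≥ maxL)
        · rw [pvAllowed_full maxL _ _ hf, pvAllowed_full maxL rest _ hf]
        · simp [pvAllowed, hf, hg]
      have eA : pvGoA maxL cap (seg :: rest) filtered seen = pvGoA maxL cap rest filtered seen := by
        simp [pvGoA, hg]
      have eB : pvKeep cap (seg :: rest) counts = pvKeep cap rest counts := by
        simp [pvKeep, hg]
      rw [eA, eB]
      exact ih filtered seen counts ⟨by rw [hkeys, hstep], hnd, hval, hnew⟩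
    | some lid =>
      have hsize : seen.size = seen.keys.length := by simp [PySem.Dict.size, PySem.Dict.keys]
      by_cases hin : seen.contains lid
      case pos =>
        -- lid already admitted: A never skips on the literature-count check
        have hmem : lid ∈ seen.keys := (PySem.Dict.contains_iff_mem_keys seen lid).mp hin
        have hv : seen.get? lid = some (seen.getD lid 0) := by
          have hc := PySem.Dict.contains_eq_isSome_get? seen lid
          rw [hin] at hc
          cases hq : seen.get? lid with
          | none => rw [hq] at hc; simp at hc
          | some w => simp [PySem.Dict.getD_eq_get?_getD, hq]
        have hcounts_lid : counts.get? lid = some (seen.getD lid 0) := by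
          rw [hval lid hmem, hv]
        have hmemc : lid ∈ counts.keys := by
          rw [hkeys]; exact mem_pvAllowed _ _ _ _ hmem
        have hcontc : counts.contains lid := (PySem.Dict.contains_iff_mem_keys counts lid).mpr hmemc
        have hstep : pvAllowed maxL (seg :: rest) seen.keys = pvAllowed maxL rest seen.keys := by
          by_cases hf : ((seen.keys.length : Int) ≥ maxL)
          · rw [pvAllowed_full maxL _ _ hf, pvAllowed_full maxL rest _ hf]
          · simp [pvAllowed, hf, hg, hmem]
        by_cases hcap : seen.getD lid 0 ≥ cap
        case pos =>
          -- dropped by the per-literature cap; seen unchanged (key already present)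
          have eA : pvGoA maxL cap (seg :: rest) filtered seen = pvGoA maxL cap rest filtered seen := by
            simp [pvGoA, hg, hin, hcap]
          have eB : pvKeep cap (seg :: rest) counts = pvKeep cap rest counts := by
            simp [pvKeep, hg, hcounts_lid, show ¬ (seen.getD lid 0 < cap) by omega]
          rw [eA, eB]
          exact ih filtered seen counts ⟨by rw [hkeys, hstep], hnd, hval, hnew⟩
        case neg =>
          have eA : pvGoA maxL cap (seg :: rest) filtered seen
              = pvGoA maxL cap rest (filtered ++ [seg]) (seen.insert lid (seen.getD lid 0 + 1)) := by
            simp [pvGoA, hg, hin, hcap]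
          have eB : pvKeep cap (seg :: rest) counts
              = seg :: pvKeep cap rest (counts.insert lid (seen.getD lid 0 + 1)) := by
            simp [pvKeep, hg, hcounts_lid, show seen.getD lid 0 < cap by omega]
          have hrel' : pvRel maxL rest (seen.insert lid (seen.getD lid 0 + 1))
              (counts.insert lid (seen.getD lid 0 + 1)) := by
            refine ⟨?_, ?_, ?_, ?_⟩
            · rw [PySem.Dict.keys_insert_of_contains _ _ hcontc,
                PySem.Dict.keys_insert_of_contains _ _ hin, hkeys, hstep]
            · rw [PySem.Dict.keys_insert_of_contains _ _ hin]; exact hnd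
            · intro k hk
              rw [PySem.Dict.keys_insert_of_contains _ _ hin] at hk
              by_cases hkl : k = lid
              · subst hkl; rw [PySem.Dict.get?_insert_self, PySem.Dict.get?_insert_self]
              · rw [PySem.Dict.get?_insert_of_ne _ _ hkl, PySem.Dict.get?_insert_of_ne _ _ hkl]
                exact hval k hk
            · intro k hk hks
              rw [PySem.Dict.keys_insert_of_contains _ _ hcontc] at hk
              rw [PySem.Dict.keys_insert_of_contains _ _ hin] at hks
              have hkl : k ≠ lid := fun h => hks (h ▸ hmem)
              rw [PySem.Dict.get?_insert_of_ne _ _ hkl]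
              exact hnew k hk hks
          rw [eA, eB, ih (filtered ++ [seg]) _ _ hrel']
          simp
      case neg =>
        have hinf : seen.contains lid = false := by simpa using hin
        have hnmem : lid ∉ seen.keys := fun h =>
          hin ((PySem.Dict.contains_iff_mem_keys seen lid).mpr h)
        have hv0 : seen.getD lid 0 = 0 := PySem.Dict.getD_of_not_contains _ _ hinf
        by_cases hf : ((seen.size : Int) ≥ maxL)
        case pos =>
          -- a fresh literature while the literature count is full: skipped, seen unchanged
          have hsz : ((seen.keys.length : Int) ≥ maxL) := by rw [← hsize]; exact hf
          have hstep : pvAllowed maxL (seg :: rest) seen.keys = seen.keys :=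
            pvAllowed_full maxL _ _ hsz
          have hcounts_lid : counts.get? lid = none := by
            rw [PySem.Dict.get?_eq_none_iff_not_mem_keys, hkeys, hstep]; exact hnmem
          have eA : pvGoA maxL cap (seg :: rest) filtered seen = pvGoA maxL cap rest filtered seen := by
            simp [pvGoA, hg, hinf, hf]
          have eB : pvKeep cap (seg :: rest) counts = pvKeep cap rest counts := by
            simp [pvKeep, hg, hcounts_lid]
          rw [eA, eB]
          exact ih filtered seen counts
            ⟨by rw [hkeys, hstep, pvAllowed_full maxL rest _ hsz], hnd, hval, hnew⟩
        case neg =>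
          -- a fresh literature admitted: the defaultdict read inserts it with value 0
          have hsz : ¬ ((seen.keys.length : Int) ≥ maxL) := by rw [← hsize]; exact hf
          have hstep : pvAllowed maxL (seg :: rest) seen.keys
              = pvAllowed maxL rest (seen.keys ++ [lid]) := by
            simp [pvAllowed, hsz, hg, hnmem]
          have hkeys' : (seen.insert lid 0).keys = seen.keys ++ [lid] :=
            PySem.Dict.keys_insert_of_not_contains _ _ hinf
          have hmem' : lid ∈ counts.keys := by
            rw [hkeys, hstep]
            exact mem_pvAllowed _ _ _ _ (by simp)
          have hcontc : counts.contains lid := (PySem.Dict.contains_iff_mem_keys counts lid).mpr hmem'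
          have hcounts_lid : counts.get? lid = some 0 := hnew lid hmem' hnmem
          have hnd' : (seen.insert lid 0).keys.Nodup := by
            rw [hkeys']; exact pvNodupSnoc hnd hnmem
          have hval' : ∀ k, k ∈ (seen.insert lid 0).keys → counts.get? k = (seen.insert lid 0).get? k := by
            intro k hk
            rw [hkeys'] at hk
            by_cases hkl : k = lid
            · subst hkl; rw [PySem.Dict.get?_insert_self]; exact hcounts_lid
            · rw [PySem.Dict.get?_insert_of_ne _ _ hkl]
              have hkm : k ∈ seen.keys := by
                rcases List.mem_append.mp hk with h | h
                · exact h
                · simp at h; exact absurd h hkl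
              exact hval k hkm
          by_cases hcap : (0 : Int) ≥ cap
          case pos =>
            -- cap already reached at count 0: dropped, but lid now occupies a literature slot
            have eA : pvGoA maxL cap (seg :: rest) filtered seen
                = pvGoA maxL cap rest filtered (seen.insert lid 0) := by
              simp [pvGoA, hg, hinf, hf, hv0, hcap]
            have eB : pvKeep cap (seg :: rest) counts = pvKeep cap rest counts := by
              simp [pvKeep, hg, hcounts_lid, show ¬ ((0 : Int) < cap) by omega]
            rw [eA, eB]
            refine ih filtered (seen.insert lid 0) counts ⟨?_, hnd', hval', ?_⟩
            · rw [hkeys, hstep, hkeys']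
            · intro k hk hks
              rw [hkeys'] at hks
              exact hnew k hk (fun h => hks (by simp [h]))
          case neg =>
            have eA : pvGoA maxL cap (seg :: rest) filtered seen
                = pvGoA maxL cap rest (filtered ++ [seg]) ((seen.insert lid 0).insert lid (0 + 1)) := by
              simp [pvGoA, hg, hinf, hf, hv0, hcap]
            have eB : pvKeep cap (seg :: rest) counts
                = seg :: pvKeep cap rest (counts.insert lid (0 + 1)) := by
              simp [pvKeep, hg, hcounts_lid, show (0 : Int) < cap by omega]
            have hc' : (seen.insert lid 0).contains lid = true :=
              PySem.Dict.contains_insert_self _ _ _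
            have hkeys'' : ((seen.insert lid 0).insert lid (0 + 1)).keys = seen.keys ++ [lid] := by
              rw [PySem.Dict.keys_insert_of_contains _ _ hc', hkeys']
            have hrel' : pvRel maxL rest ((seen.insert lid 0).insert lid (0 + 1))
                (counts.insert lid (0 + 1)) := by
              refine ⟨?_, ?_, ?_, ?_⟩
              · rw [PySem.Dict.keys_insert_of_contains _ _ hcontc, hkeys, hstep, hkeys'']
              · rw [hkeys'']; exact pvNodupSnoc hnd hnmem
              · intro k hk
                rw [hkeys''] at hk
                by_cases hkl : k = lid
                · subst hkl; rw [PySem.Dict.get?_insert_self, PySem.Dict.get?_insert_self]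
                · rw [PySem.Dict.get?_insert_of_ne _ _ hkl,
                    PySem.Dict.get?_insert_of_ne _ _ hkl,
                    PySem.Dict.get?_insert_of_ne _ _ hkl]
                  have hkm : k ∈ seen.keys := by
                    rcases List.mem_append.mp hk with h | h
                    · exact h
                    · simp at h; exact absurd h hkl
                  exact hval k hkm
              · intro k hk hks
                rw [PySem.Dict.keys_insert_of_contains _ _ hcontc] at hk
                rw [hkeys''] at hks
                have hkl : k ≠ lid := fun h => hks (by simp [h])
                rw [PySem.Dict.get?_insert_of_ne _ _ hkl]
                exact hnew k hk (fun h => hks (by simp [h]))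
            rw [eA, eB, ih (filtered ++ [seg]) _ _ hrel']
            simp

-- the initial states (empty defaultdict / the counts built from pass 1) satisfy the invariant
theorem pvInit (maxL : Int) (segs : List (List (String × Int))) :
    pvRel maxL segs PySem.Dict.empty
      ((pvAllowed maxL segs []).foldl (fun d lid => d.insert lid 0) PySem.Dict.empty) := by
  have hnd : (pvAllowed maxL segs []).Nodup := pvAllowed_nodup maxL segs [] List.nodup_nil
  have hitems : ((pvAllowed maxL segs []).foldl (fun d lid => d.insert lid 0)
      (PySem.Dict.empty : PySem.Dict Int Int)).items
      = (PySem.Dict.empty : PySem.Dict Int Int).items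
        ++ (pvAllowed maxL segs []).map (fun a => (a, (0 : Int))) := by
    exact PySem.Dict.items_foldl_insert_fresh (pvAllowed maxL segs []) (fun a => a)
      (fun _ => 0) PySem.Dict.empty (fun a _ => rfl) (by simpa using hnd)
  have hkeys : ((pvAllowed maxL segs []).foldl (fun d lid => d.insert lid 0)
      (PySem.Dict.empty : PySem.Dict Int Int)).keys = pvAllowed maxL segs [] := by
    simp only [PySem.Dict.keys, hitems]
    simp [PySem.Dict.empty, Function.comp_def]
  refine ⟨?_, ?_, ?_, ?_⟩
  · rw [hkeys]; rfl
  · exact List.nodup_nil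
  · intro k hk; simp [PySem.Dict.keys, PySem.Dict.empty] at hk
  · intro k hk _
    rw [hkeys] at hk
    have hm : (k, (0 : Int)) ∈ ((pvAllowed maxL segs []).foldl (fun d lid => d.insert lid 0)
        (PySem.Dict.empty : PySem.Dict Int Int)).items := by
      rw [hitems]
      simp [PySem.Dict.empty]
      exact hk
    exact PySem.Dict.get?_of_mem_items _ hm (by rw [hkeys]; exact hnd)

-- ===== VERDICT (by name: the statement is the Claim_ definition above) =====
theorem limit_segments_by_literature_py_spec : Claim_equal_limit_segments_by_literature_py := by
  intro segments maxL cap _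
  unfold Spec_limit_segments_by_literature_py
  unfold limit_segments_by_literature_py limit_segments_by_literature_py_alt
  rw [pvMain maxL cap segments [] _ _ (pvInit maxL segments)]
  rfl
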